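-- pv_equiv track=rewrite | github.com/wwei-lab/LongPASS | LongPass/misc.py | range_to_peak
-- ===== SOURCE A (Python) =====
-- def range_to_peak(all_ranges_filterBylength):
--   #dict to store position count
--   chro_strand_pos_dict = {}
--   for range_ in all_ranges_filterBylength:
--     chro,strand,start,end = range_
--     chro_strand_start = chro + "_" + strand + "_" + str(start)
--     chro_strand_end = chro + "_" + strand + "_" + str(end)
--     if chro_strand_start in chro_strand_pos_dict:
--       chro_strand_pos_dict[chro_strand_start][0] += 1
--     else:
--       chro_strand_pos_dict[chro_strand_start] = [1,0]
--     if chro_strand_end in chro_strand_pos_dict: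
--       chro_strand_pos_dict[chro_strand_end][1] += 1
--     else:
--       chro_strand_pos_dict[chro_strand_end] = [0,1]
--
--   # for pos,counts_list in chro_strand_pos_dict.items():
--   #   if counts_list[0] < peak_threshold:
--   #       chro_strand_pos_dict[pos][0] = 0
--   #   if counts_list[1] < peak_threshold:
--   #       chro_strand_pos_dict[pos][1] = 0
--
--   # chro_strand_pos_dict = {i:chro_strand_pos_dict[i] for i in chro_strand_pos_dict if chro_strand_pos_dict[i] != [0,0]}
--
--   return chro_strand_pos_dict
-- ===== SOURCE B (Python) =====
-- def range_to_peak(all_ranges_filterBylength):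
--     # two independent counts (starts, ends) + one merge pass over keys in first-occurrence order
--     start_keys = []
--     end_keys = []
--     for chro, strand, start, end in all_ranges_filterBylength:
--         start_keys.append(chro + "_" + strand + "_" + str(start))
--         end_keys.append(chro + "_" + strand + "_" + str(end))
--     starts = {}
--     for k in start_keys:
--         starts[k] = starts.get(k, 0) + 1
--     ends = {}
--     for k in end_keys:
--         ends[k] = ends.get(k, 0) + 1
--     order = dict.fromkeys(x for pair in zip(start_keys, end_keys) for x in pair)
--     return {k: [starts.get(k, 0), ends.get(k, 0)] for k in order}
-- ===== Notes on version B (the rewrite author's own statement) =====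
-- stated objective: alternative
-- what changed: Replaces A's single interleaved pass that conditionally mutates a two-slot list per key with two independent frequency counts (starts, ends) plus a final merge pass over the keys in first-occurrence order.
import Mathlib
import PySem

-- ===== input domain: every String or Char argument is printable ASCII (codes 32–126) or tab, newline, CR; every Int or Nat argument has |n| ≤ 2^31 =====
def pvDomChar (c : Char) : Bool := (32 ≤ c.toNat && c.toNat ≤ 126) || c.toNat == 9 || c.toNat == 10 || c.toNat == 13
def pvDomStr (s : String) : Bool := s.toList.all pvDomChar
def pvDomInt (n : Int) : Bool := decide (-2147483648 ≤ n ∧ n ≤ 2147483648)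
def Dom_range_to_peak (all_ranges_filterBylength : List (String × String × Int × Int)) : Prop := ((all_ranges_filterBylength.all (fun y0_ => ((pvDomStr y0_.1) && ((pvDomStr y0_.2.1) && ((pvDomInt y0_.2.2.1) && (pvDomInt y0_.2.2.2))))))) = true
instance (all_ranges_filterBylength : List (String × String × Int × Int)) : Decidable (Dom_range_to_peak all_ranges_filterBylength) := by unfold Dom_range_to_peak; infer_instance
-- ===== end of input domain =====

-- ===== PORT A =====
-- B builds two independent counters (starts, ends) and merges them in one pass over the keys
-- in first-occurrence order, instead of A's single interleaved pass mutating a two-slot list.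
def range_to_peak (all_ranges_filterBylength : List (String × String × Int × Int)) : List (String × List Int) :=
  (all_ranges_filterBylength.foldl (fun d r =>
    let chro := r.1; let strand := r.2.1; let start := r.2.2.1; let end_ := r.2.2.2
    let ks := chro ++ "_" ++ strand ++ "_" ++ PySem.Int.toStr start
    let ke := chro ++ "_" ++ strand ++ "_" ++ PySem.Int.toStr end_
    let d := if d.contains ks then d.modify ks [] (fun v => v.set 0 (v.getD 0 0 + 1))
             else d.insert ks [1, 0]
    if d.contains ke then d.modify ke [] (fun v => v.set 1 (v.getD 1 0 + 1))
    else d.insert ke [0, 1]) PySem.Dict.empty).items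

-- ===== PORT B =====
def range_to_peak_alt (all_ranges_filterBylength : List (String × String × Int × Int)) : List (String × List Int) :=
  let startKeys := all_ranges_filterBylength.map (fun r => r.1 ++ "_" ++ r.2.1 ++ "_" ++ PySem.Int.toStr r.2.2.1)
  let endKeys := all_ranges_filterBylength.map (fun r => r.1 ++ "_" ++ r.2.1 ++ "_" ++ PySem.Int.toStr r.2.2.2)
  let starts := startKeys.foldl (fun d k => d.insert k (d.getD k 0 + 1)) PySem.Dict.empty
  let ends := endKeys.foldl (fun d k => d.insert k (d.getD k 0 + 1)) PySem.Dict.empty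
  let order := PySem.List.dedup ((startKeys.zip endKeys).flatMap (fun p => [p.1, p.2]))
  (order.foldl (fun d k => d.insert k [starts.getD k 0, ends.getD k 0]) PySem.Dict.empty).items

-- ===== PRECONDITION & SPEC =====
def Spec_range_to_peak (all_ranges_filterBylength : List (String × String × Int × Int)) (out : List (String × List Int)) : Prop := out = range_to_peak_alt all_ranges_filterBylength
instance (all_ranges_filterBylength : List (String × String × Int × Int)) (out : List (String × List Int)) : Decidable (Spec_range_to_peak all_ranges_filterBylength out) := by unfold Spec_range_to_peak; infer_instance

-- ===== CLAIM (what is proved, stated in full; the proofs are below) =====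
def Claim_equal_range_to_peak : Prop := ∀ (all_ranges_filterBylength : List (String × String × Int × Int)), Dom_range_to_peak all_ranges_filterBylength → Spec_range_to_peak all_ranges_filterBylength (range_to_peak all_ranges_filterBylength)

-- ===== LEMMAS AND PROOFS =====

-- the two keys of one range
def pvKeyS (r : String × String × Int × Int) : String := r.1 ++ "_" ++ r.2.1 ++ "_" ++ PySem.Int.toStr r.2.2.1
def pvKeyE (r : String × String × Int × Int) : String := r.1 ++ "_" ++ r.2.1 ++ "_" ++ PySem.Int.toStr r.2.2.2

-- the flattened event stream: (key, true) for a start, (key, false) for an end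
def pvEvents (rs : List (String × String × Int × Int)) : List (String × Bool) :=
  rs.flatMap (fun r => [(pvKeyS r, true), (pvKeyE r, false)])

-- one event step of A's loop
def pvStepA (d : PySem.Dict String (List Int)) (e : String × Bool) : PySem.Dict String (List Int) :=
  if d.contains e.1 then
    d.modify e.1 [] (fun v => if e.2 then v.set 0 (v.getD 0 0 + 1) else v.set 1 (v.getD 1 0 + 1))
  else d.insert e.1 (if e.2 then [1, 0] else [0, 1])

-- the value B assigns to a key, expressed on the event stream
def pvVal (es : List (String × Bool)) (k : String) : List Int :=
  [(es.count (k, true) : Int), (es.count (k, false) : Int)]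

theorem pvFoldA_eq_events (rs : List (String × String × Int × Int)) (d : PySem.Dict String (List Int)) :
    rs.foldl (fun d r =>
      let chro := r.1; let strand := r.2.1; let start := r.2.2.1; let end_ := r.2.2.2
      let ks := chro ++ "_" ++ strand ++ "_" ++ PySem.Int.toStr start
      let ke := chro ++ "_" ++ strand ++ "_" ++ PySem.Int.toStr end_
      let d := if d.contains ks then d.modify ks [] (fun v => v.set 0 (v.getD 0 0 + 1))
               else d.insert ks [1, 0]
      if d.contains ke then d.modify ke [] (fun v => v.set 1 (v.getD 1 0 + 1))
      else d.insert ke [0, 1]) d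
    = (pvEvents rs).foldl pvStepA d := by
  induction rs generalizing d with
  | nil => rfl
  | cons r t ih =>
    simp only [pvEvents, List.flatMap_cons, List.cons_append, List.nil_append,
      List.foldl_cons, pvStepA, pvKeyS, pvKeyE]
    exact ih _

theorem pvCount_not_mem (es : List (String × Bool)) (k : String) (b : Bool)
    (h : k ∉ es.map Prod.fst) : es.count (k, b) = 0 := by
  rw [List.count_eq_zero]
  intro hm; exact h (List.mem_map.mpr ⟨_, hm, rfl⟩)

theorem pvVal_append_of_ne (es : List (String × Bool)) (e : String × Bool) (k : String)
    (h : k ≠ e.1) : pvVal (es ++ [e]) k = pvVal es k := by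
  obtain ⟨k0, b⟩ := e
  simp only at h
  simp [pvVal, List.count_append, Prod.ext_iff, Ne.symm h]

theorem pvVal_append_self (es : List (String × Bool)) (k : String) (b : Bool) :
    pvVal (es ++ [(k, b)]) k
      = if b then [(es.count (k, true) : Int) + 1, (es.count (k, false) : Int)]
        else [(es.count (k, true) : Int), (es.count (k, false) : Int) + 1] := by
  cases b <;> simp [pvVal, List.count_append]

theorem pvInvariant (es : List (String × Bool)) :
    ((es.foldl pvStepA PySem.Dict.empty).items)
      = (PySem.Set.ofList (es.map Prod.fst)).map (fun k => (k, pvVal es k)) := by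
  induction es using List.reverseRecOn with
  | nil => rfl
  | append_singleton es e ih =>
    obtain ⟨k, b⟩ := e
    rw [List.foldl_append, List.foldl_cons, List.foldl_nil]
    set D := es.foldl pvStepA PySem.Dict.empty with hD
    have hkeys : D.keys = PySem.Set.ofList (es.map Prod.fst) := by
      show D.items.map (·.1) = _
      rw [ih, List.map_map]
      exact List.map_id'' (fun x => rfl) _
    have hnd : D.keys.Nodup := by rw [hkeys]; exact PySem.Set.nodup_ofList _
    have hofl : PySem.Set.ofList ((es ++ [(k, b)]).map Prod.fst)
        = PySem.Set.add (PySem.Set.ofList (es.map Prod.fst)) k := by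
      simp [PySem.Set.ofList_eq_foldl, List.foldl_append]
    by_cases hmem : k ∈ PySem.Set.ofList (es.map Prod.fst)
    · -- key already present: A modifies in place, the key list is unchanged
      have hc : D.contains k = true := by
        rw [PySem.Dict.contains_eq_decide_mem_keys, hkeys]; simpa using hmem
      have hgetD : D.getD k [] = pvVal es k :=
        PySem.Dict.getD_of_mem_items _ (by rw [ih]; exact List.mem_map.mpr ⟨k, hmem, rfl⟩) hnd _
      have hmod : pvStepA D (k, b)
          = D.insert k ((fun v => if b then v.set 0 (v.getD 0 0 + 1) else v.set 1 (v.getD 1 0 + 1)) (D.getD k [])) := by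
        simp [pvStepA, hc]; rfl
      have hadd : (PySem.Set.ofList (es.map Prod.fst)).add k = PySem.Set.ofList (es.map Prod.fst) := by
        simp [PySem.Set.add, PySem.Set.contains, hmem]
      rw [hmod, PySem.Dict.items_insert_of_contains _ _ hc, ih, hofl, hadd, List.map_map]
      refine List.map_congr_left ?_
      intro k' hk'
      by_cases hkk : k' = k
      · subst hkk
        rw [hgetD]
        simp only [Function.comp, beq_self_eq_true, if_pos]
        rw [pvVal_append_self]
        cases b <;> simp [pvVal]
      · simp only [Function.comp, beq_iff_eq, if_neg hkk]
        rw [pvVal_append_of_ne _ _ _ hkk]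
    · -- fresh key: A appends a new entry
      have hc : D.contains k = false := by
        rw [PySem.Dict.contains_eq_decide_mem_keys, hkeys]; simpa using hmem
      have hins : pvStepA D (k, b) = D.insert k (if b then [1, 0] else [0, 1]) := by
        simp [pvStepA, hc]
      have hadd : (PySem.Set.ofList (es.map Prod.fst)).add k = PySem.Set.ofList (es.map Prod.fst) ++ [k] := by
        simp [PySem.Set.add, PySem.Set.contains, hmem]
      rw [hins, PySem.Dict.items_insert_of_not_contains _ _ hc, ih, hofl, hadd, List.map_append]
      congr 1
      · refine List.map_congr_left ?_
        intro k' hk'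
        have hkk : k' ≠ k := fun h => hmem (h ▸ hk')
        rw [pvVal_append_of_ne _ _ _ hkk]
      · have h0 : ∀ b' : Bool, es.count (k, b') = 0 :=
          fun b' => pvCount_not_mem es k b' (by simpa using hmem)
        rw [List.map_singleton, pvVal_append_self]
        cases b <;> simp [h0]

theorem pvCountS (rs : List (String × String × Int × Int)) (k : String) :
    (pvEvents rs).count (k, true) = (rs.map pvKeyS).count k := by
  induction rs with
  | nil => rfl
  | cons r t ih =>
    have h2 : pvEvents (r :: t) = (pvKeyS r, true) :: (pvKeyE r, false) :: pvEvents t := by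
      simp [pvEvents, List.flatMap_cons]
    rw [h2]
    simp [List.count_cons, ih, Prod.ext_iff]

theorem pvCountE (rs : List (String × String × Int × Int)) (k : String) :
    (pvEvents rs).count (k, false) = (rs.map pvKeyE).count k := by
  induction rs with
  | nil => rfl
  | cons r t ih =>
    have h2 : pvEvents (r :: t) = (pvKeyS r, true) :: (pvKeyE r, false) :: pvEvents t := by
      simp [pvEvents, List.flatMap_cons]
    rw [h2]
    simp [List.count_cons, ih, Prod.ext_iff]

theorem pvEvents_map_fst (rs : List (String × String × Int × Int)) :
    (pvEvents rs).map Prod.fst = rs.flatMap (fun r => [pvKeyS r, pvKeyE r]) := by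
  simp [pvEvents, List.map_flatMap]

theorem pvAlt_eq (rs : List (String × String × Int × Int)) :
    range_to_peak_alt rs = (PySem.Set.ofList ((pvEvents rs).map Prod.fst)).map (fun k => (k, pvVal (pvEvents rs) k)) := by
  have hdef : range_to_peak_alt rs = ((PySem.List.dedup (((rs.map pvKeyS).zip (rs.map pvKeyE)).flatMap (fun p => [p.1, p.2]))).foldl
      (fun d k => d.insert k [((rs.map pvKeyS).foldl (fun d k => d.insert k (d.getD k 0 + 1)) PySem.Dict.empty).getD k 0,
                              ((rs.map pvKeyE).foldl (fun d k => d.insert k (d.getD k 0 + 1)) PySem.Dict.empty).getD k 0])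
      PySem.Dict.empty).items := rfl
  rw [hdef]
  have hzip : ((rs.map pvKeyS).zip (rs.map pvKeyE)).flatMap (fun p => [p.1, p.2])
      = rs.flatMap (fun r => [pvKeyS r, pvKeyE r]) := by
    rw [List.zip_map']; simp [List.flatMap_map]
  rw [PySem.Dict.items_foldl_insert_fresh _ (fun x => x) _ _
      (by intro a _; exact PySem.Dict.contains_empty a)
      (by simp)]
  rw [hzip, PySem.List.dedup_eq_ofList, pvEvents_map_fst]
  refine (List.nil_append _).trans (List.map_congr_left ?_)
  intro k _
  rw [PySem.Dict.getD_foldl_insert_add_one, PySem.Dict.getD_foldl_insert_add_one]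
  simp [pvVal, pvCountS, pvCountE]

-- ===== VERDICT (by name: the statement is the Claim_ definition above) =====
theorem range_to_peak_spec : Claim_equal_range_to_peak := by
  intro rs _
  unfold Spec_range_to_peak
  rw [range_to_peak, pvFoldA_eq_events, pvInvariant, pvAlt_eq]
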